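-- pv_equiv track=rewrite | github.com/MinTreesLearn/ML | Codeforces Submissions/1320/A/165891622.py | get_max_rate
-- ===== SOURCE A (Python) =====
-- def get_max_rate(rates: list) -> int:
--     sums = {}
--     for idx, el in enumerate(rates):
--         if el in sums:
--             sums[el] += el + idx
--         else:
--             sums[el] = el + idx
--
--     return max(sums.values())
-- ===== SOURCE B (Python) =====
-- def get_max_rate(rates: list) -> int:
--     # sort-then-scan grouping instead of dict bucketing
--     pairs = sorted(((el, el + i) for i, el in enumerate(rates)), key=lambda p: p[0])
--     best = None
--     i = 0
--     n = len(pairs)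
--     while i < n:
--         key = pairs[i][0]
--         s = 0
--         while i < n and pairs[i][0] == key:
--             s += pairs[i][1]
--             i += 1
--         if best is None or s > best:
--             best = s
--     if best is None:
--         raise ValueError("max() arg is an empty sequence")
--     return best
-- ===== Notes on version B (the rewrite author's own statement) =====
-- stated objective: alternative
-- what changed: Replaces the dict-bucketing accumulation with sort-by-value followed by a run-length scan over the sorted (value, value+index) pairs, keeping a running maximum of run sums.
import Mathlib
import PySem

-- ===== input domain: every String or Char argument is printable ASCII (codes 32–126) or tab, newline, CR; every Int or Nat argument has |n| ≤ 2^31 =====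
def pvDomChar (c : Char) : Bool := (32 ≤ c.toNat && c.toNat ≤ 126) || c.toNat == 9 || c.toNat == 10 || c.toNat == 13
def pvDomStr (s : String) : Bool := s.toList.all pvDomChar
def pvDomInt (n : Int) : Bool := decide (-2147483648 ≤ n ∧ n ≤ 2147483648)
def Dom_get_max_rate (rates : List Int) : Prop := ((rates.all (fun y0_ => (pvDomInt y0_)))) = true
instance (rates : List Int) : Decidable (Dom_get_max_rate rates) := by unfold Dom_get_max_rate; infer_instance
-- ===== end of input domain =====

-- B replaces A's dict-bucketing accumulation by sort-by-value then a run-length scan over the sorted pairs ("alternative": different algorithm, similar cost).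

-- ===== PORT A =====
-- one loop step of A: `if el in sums: sums[el] += el + idx else: sums[el] = el + idx`  (p = (idx, el))
def stepA (d : PySem.Dict Int Int) (p : Int × Int) : PySem.Dict Int Int :=
  if d.contains p.2 then d.insert p.2 (d.getD p.2 0 + (p.2 + p.1))
  else d.insert p.2 (p.2 + p.1)

def get_max_rate (rates : List Int) : Int :=
  let sums := (PySem.List.enumerate rates).foldl stepA PySem.Dict.empty
  -- max(sums.values()); raises ValueError on empty, excluded by Pre_
  (PySem.List.max? sums.values (fun v => v)).getD 0

-- ===== PORT B =====
-- B's outer while loop: each step sums the leading run of equal keys (inner while, via takeWhile/dropWhile) and updates best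
-- `if best is None or s > best: best = s` as a helper
def updBest (best : Option Int) (s : Int) : Option Int :=
  match best with | none => some s | some b => if s > b then some s else some b

def goB : List (Int × Int) → Option Int → Option Int
  | [], best => best
  | (k, v) :: rest, best =>
      let run := rest.takeWhile (fun p => p.1 == k)
      let rest' := rest.dropWhile (fun p => p.1 == k)
      let s := v + (run.map (fun p => p.2)).sum
      goB rest' (updBest best s)
  termination_by ps _ => ps.length
  decreasing_by
    simp only [List.length_cons]
    have := List.length_dropWhile_le (fun p => p.1 == k) rest
    omega

def get_max_rate_alt (rates : List Int) : Int :=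
  let pairs := (PySem.List.enumerate rates).map (fun p => (p.2, p.2 + p.1))
  -- `best is None` at the end (empty input) raises ValueError, excluded by Pre_
  (goB (PySem.List.sorted pairs (fun p => p.1)) none).getD 0

-- ===== PRECONDITION & SPEC =====
-- Pre_ excludes only the empty list, on which A raises ValueError (max() of an empty sequence); B also raises there.
def Pre_get_max_rate (rates : List Int) : Prop := rates ≠ []
instance (rates : List Int) : Decidable (Pre_get_max_rate rates) := by unfold Pre_get_max_rate; infer_instance
def pvWitness_get_max_rate : List Int := [3, -1, 3, 0]

def Spec_get_max_rate (rates : List Int) (out : Int) : Prop := out = get_max_rate_alt rates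
instance (rates : List Int) (out : Int) : Decidable (Spec_get_max_rate rates out) := by unfold Spec_get_max_rate; infer_instance

-- ===== CLAIM (what is proved, stated in full; the proofs are below) =====
def Claim_equal_get_max_rate : Prop := ∀ (rates : List Int), Dom_get_max_rate rates → Pre_get_max_rate rates → Spec_get_max_rate rates (get_max_rate rates)

-- ===== LEMMAS AND PROOFS =====

-- proof-side recursive form of B's run-length scan (run sum, then recurse on the rest)
def scanB : List (Int × Int) → Int
  | [] => 0
  | (k, v) :: rest =>
      let run := rest.takeWhile (fun p => p.1 == k)
      let rest' := rest.dropWhile (fun p => p.1 == k)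
      let s := v + (run.map (fun p => p.2)).sum
      match rest' with
      | [] => s
      | _ :: _ => max s (scanB rest')
  termination_by ps => ps.length
  decreasing_by
    simp only [List.length_cons]
    have := List.length_dropWhile_le (fun p => p.1 == k) rest
    omega

-- per-key contribution sum over a list of (idx, el) pairs: Σ_{(idx,el), el = k} (el + idx)
def Fl (l : List (Int × Int)) (k : Int) : Int :=
  ((l.filter (fun p => p.2 == k)).map (fun p => p.2 + p.1)).sum

def Fsum (rates : List Int) (k : Int) : Int := Fl (PySem.List.enumerate rates) k

-- per-key sum over (key, val) pairs as B sees them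
def Gl (ps : List (Int × Int)) (k : Int) : Int :=
  ((ps.filter (fun q => q.1 == k)).map (fun q => q.2)).sum

-- "v is the maximum of f over the keys ks"
def IsMaxOf (v : Int) (ks : List Int) (f : Int → Int) : Prop :=
  (∃ k ∈ ks, v = f k) ∧ ∀ k ∈ ks, f k ≤ v

theorem isMaxOf_unique {v w : Int} {ks ls : List Int} {f g : Int → Int}
    (hv : IsMaxOf v ks f) (hw : IsMaxOf w ls g)
    (hmem : ∀ k, k ∈ ks ↔ k ∈ ls) (hfg : ∀ k, f k = g k) : v = w := by
  obtain ⟨⟨k1, hk1, hv1⟩, hvmax⟩ := hv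
  obtain ⟨⟨k2, hk2, hw1⟩, hwmax⟩ := hw
  have h1 : v ≤ w := by
    subst hv1; rw [hfg k1]; exact hwmax k1 ((hmem k1).1 hk1)
  have h2 : w ≤ v := by
    subst hw1; rw [← hfg k2]; exact hvmax k2 ((hmem k2).2 hk2)
  omega

theorem isMaxOf_congr {v : Int} {ks ls : List Int} {f g : Int → Int}
    (h : IsMaxOf v ks f) (hmem : ∀ k, k ∈ ks ↔ k ∈ ls) (hfg : ∀ k, f k = g k) :
    IsMaxOf v ls g := by
  obtain ⟨⟨k, hk, hv⟩, hmax⟩ := h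
  exact ⟨⟨k, (hmem k).1 hk, by rw [hv, hfg]⟩,
    fun k' hk' => by rw [← hfg]; exact hmax k' ((hmem k').2 hk')⟩

-- ---- A-side characterisation ----

theorem stepA_eq : stepA = fun d p => d.insert p.2 (if d.contains p.2 then d.getD p.2 0 + (p.2 + p.1) else p.2 + p.1) := by
  funext d p
  unfold stepA
  split <;> rfl

theorem getD_stepA (d : PySem.Dict Int Int) (p : Int × Int) (k : Int) :
    (stepA d p).getD k 0 = if k = p.2 then d.getD p.2 0 + (p.2 + p.1) else d.getD k 0 := by
  unfold stepA
  split
  · rw [PySem.Dict.getD_insert]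
  · rename_i hc
    rw [PySem.Dict.getD_insert]
    split
    · rename_i he
      rw [PySem.Dict.getD_of_not_contains (h := by simp [hc])]
      omega
    · rfl

theorem getD_foldl_stepA (l : List (Int × Int)) (d : PySem.Dict Int Int) (k : Int) :
    (l.foldl stepA d).getD k 0 = d.getD k 0 + Fl l k := by
  induction l generalizing d with
  | nil => simp [Fl]
  | cons p t ih =>
      rw [List.foldl_cons, ih, getD_stepA]
      simp only [Fl, List.filter_cons]
      by_cases he : k = p.2
      · simp [he, List.map_cons, List.sum_cons]; ring
      · have : (p.2 == k) = false := by simp [Ne.symm he]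
        simp [he, this]

theorem keys_foldl_stepA (l : List (Int × Int)) :
    (l.foldl stepA PySem.Dict.empty).keys = PySem.Set.update (PySem.Dict.empty : PySem.Dict Int Int).keys (l.map (fun p => p.2)) := by
  rw [stepA_eq]
  exact PySem.Dict.keys_foldl_insert_key l (fun p => p.2) _ _

theorem nodup_keys_foldl_stepA (l : List (Int × Int)) :
    (l.foldl stepA PySem.Dict.empty).keys.Nodup := by
  rw [stepA_eq]
  exact PySem.Dict.nodup_keys_foldl_insert_key l (fun p => p.2) _ _ (by simp)

theorem A_side (rates : List Int) (h : rates ≠ []) :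
    IsMaxOf (get_max_rate rates) rates (Fsum rates) := by
  have hmapsnd : (PySem.List.enumerate rates).map (fun p => p.2) = rates :=
    PySem.List.map_snd_enumerate rates 0
  set l := PySem.List.enumerate rates with hl
  set sums := l.foldl stepA PySem.Dict.empty with hs
  have hnd : sums.keys.Nodup := nodup_keys_foldl_stepA l
  have hkeys : ∀ k, k ∈ sums.keys ↔ k ∈ rates := by
    intro k
    rw [hs, keys_foldl_stepA, hmapsnd]
    simp [PySem.Set.mem_update]
  have hvals : sums.values = sums.keys.map (Fsum rates) := by
    rw [PySem.Dict.values_eq_map_keys sums hnd 0]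
    congr 1
    funext k
    rw [hs, getD_foldl_stepA]
    simp [Fsum, hl]
  have hvne : sums.values ≠ [] := by
    obtain ⟨x, hx⟩ := List.exists_mem_of_ne_nil rates h
    have : x ∈ sums.keys := (hkeys x).2 hx
    rw [hvals]
    simp only [ne_eq, List.map_eq_nil_iff]
    intro hkn
    rw [hkn] at this; simp at this
  obtain ⟨m, hm⟩ : ∃ m, PySem.List.max? sums.values (fun v => v) = some m := by
    cases hmx : PySem.List.max? sums.values (fun v => v) with
    | none => exact absurd ((PySem.List.max?_eq_none_iff _ _).mp hmx) hvne
    | some m => exact ⟨m, rfl⟩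
  have hret : get_max_rate rates = m := by
    show (PySem.List.max? sums.values (fun v => v)).getD 0 = m
    rw [hm]; rfl
  constructor
  · have hmem := PySem.List.max?_mem hm
    rw [hvals] at hmem
    obtain ⟨k, hk, hfk⟩ := List.mem_map.mp hmem
    exact ⟨k, (hkeys k).1 hk, by rw [hret, hfk]⟩
  · intro k hk
    have : Fsum rates k ∈ sums.values := by
      rw [hvals]; exact List.mem_map_of_mem ((hkeys k).2 hk)
    have := PySem.List.max?_isMax hm _ this
    simpa [hret] using this

-- ---- B-side characterisation ----

theorem dropWhile_head_false {α : Type} (p : α → Bool) (l : List α) (x : α) (xs : List α)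
    (h : l.dropWhile p = x :: xs) : p x = false := by
  induction l with
  | nil => simp at h
  | cons a t ih =>
      rw [List.dropWhile_cons] at h
      split at h
      · exact ih h
      · cases h; rename_i hpa; simpa using hpa

theorem scanB_isMax : ∀ (n : Nat) (ps : List (Int × Int)), ps.length ≤ n → ps ≠ [] →
    ps.Pairwise (fun a b => a.1 ≤ b.1) →
    IsMaxOf (scanB ps) (ps.map (fun q => q.1)) (Gl ps) := by
  intro n
  induction n with
  | zero =>
      intro ps hlen hne _
      cases ps
      · exact absurd rfl hne
      · simp at hlen
  | succ n ih =>
      rintro ⟨⟩ hlen hne hpw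
      · exact absurd rfl hne
      rename_i kv rest
      obtain ⟨k, v⟩ := kv
      rw [List.pairwise_cons] at hpw
      obtain ⟨hle, hpwrest⟩ := hpw
      set run := rest.takeWhile (fun p => p.1 == k) with hrun
      set rest' := rest.dropWhile (fun p => p.1 == k) with hrest'
      have hsplit : run ++ rest' = rest := List.takeWhile_append_dropWhile
      have hrunk : ∀ p ∈ run, p.1 = k := fun p hp => by
        simpa using List.mem_takeWhile_imp hp
      have hsub : rest'.Sublist rest := List.dropWhile_sublist _
      have hpw' : rest'.Pairwise (fun a b => a.1 ≤ b.1) := hpwrest.sublist hsub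
      have hne' : ∀ q ∈ rest', q.1 ≠ k := by
        cases hr : rest' with
        | nil => simp
        | cons x xs =>
            have hxf : (x.1 == k) = false := dropWhile_head_false _ rest x xs (by rw [← hrest', hr])
            have hxk : x.1 ≠ k := by simpa using hxf
            have hxmem : x ∈ rest := hsub.mem (by rw [hr]; exact List.mem_cons_self)
            have hkx : k < x.1 := lt_of_le_of_ne (hle x hxmem) (Ne.symm hxk)
            intro q hq
            rcases List.mem_cons.mp hq with h | h
            · rw [h]; exact hxk
            · have : x.1 ≤ q.1 := by
                rw [hr] at hpw'
                exact (List.pairwise_cons.mp hpw').1 q h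
              omega
      have hGk : Gl ((k, v) :: rest) k = v + (run.map (fun p => p.2)).sum := by
        unfold Gl
        rw [List.filter_cons]
        simp only [beq_self_eq_true]
        rw [← hsplit, List.filter_append]
        rw [List.filter_eq_self.mpr (fun a ha => by simp [hrunk a ha])]
        rw [List.filter_eq_nil_iff.mpr (fun a ha => by simp [hne' a ha])]
        simp
      have hGne : ∀ k', k' ≠ k → Gl ((k, v) :: rest) k' = Gl rest' k' := by
        intro k' hk'
        unfold Gl
        rw [List.filter_cons]
        have : (k == k') = false := by simp [Ne.symm hk']
        rw [if_neg (by simp [this])]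
        rw [← hsplit, List.filter_append]
        rw [List.filter_eq_nil_iff.mpr (fun a ha => by simp [hrunk a ha, Ne.symm hk'])]
        simp
      have hscan : scanB ((k, v) :: rest) =
          match rest' with
          | [] => v + (run.map (fun p => p.2)).sum
          | _ :: _ => max (v + (run.map (fun p => p.2)).sum) (scanB rest') := by
        rw [scanB]
      cases hr : rest' with
      | nil =>
          have hrest : rest = run := by rw [← hsplit, hr]; simp
          have hval : scanB ((k, v) :: rest) = v + (run.map (fun p => p.2)).sum := by
            rw [hscan, hr]
          constructor
          · exact ⟨k, by simp, by rw [hval, hGk]⟩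
          · intro k' hk'
            have : k' = k := by
              rcases List.mem_map.mp hk' with ⟨q, hq, hqk⟩
              rcases List.mem_cons.mp hq with h | h
              · rw [h] at hqk; exact hqk.symm ▸ rfl
              · rw [hrest] at h; rw [← hqk]; exact hrunk q h
            rw [this, hGk, hval]
      | cons x xs =>
          have hval : scanB ((k, v) :: rest) = max (v + (run.map (fun p => p.2)).sum) (scanB rest') := by
            rw [hscan, hr]
          have hlen' : rest'.length ≤ n := by
            have h1 := List.length_dropWhile_le (fun p => p.1 == k) rest
            simp only [List.length_cons] at hlen
            rw [hrest']; omega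
          have hih := ih rest' hlen' (by rw [hr]; simp) hpw'
          constructor
          · rcases le_total (scanB rest') (v + (run.map (fun p => p.2)).sum) with hc | hc
            · refine ⟨k, by simp, ?_⟩
              rw [hval, hGk, max_eq_left hc]
            · obtain ⟨⟨k2, hk2, hv2⟩, _⟩ := hih
              have hk2k : k2 ≠ k := by
                rcases List.mem_map.mp hk2 with ⟨q, hq, hqk⟩
                rw [← hqk]; exact hne' q hq
              refine ⟨k2, ?_, ?_⟩
              · rcases List.mem_map.mp hk2 with ⟨q, hq, hqk⟩
                exact List.mem_map.mpr ⟨q, List.mem_cons.mpr (Or.inr (hsub.mem hq)), hqk⟩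
              · rw [hval, hGne k2 hk2k, ← hv2, max_eq_right hc]
          · intro k' hk'
            rcases List.mem_map.mp hk' with ⟨q, hq, hqk⟩
            rcases List.mem_cons.mp hq with h | h
            · have : k' = k := by rw [← hqk, h]
              rw [this, hGk, hval]; exact le_max_left _ _
            · rw [← hsplit] at h
              rcases List.mem_append.mp h with h | h
              · have : k' = k := by rw [← hqk]; exact hrunk q h
                rw [this, hGk, hval]; exact le_max_left _ _
              · have hk'k : k' ≠ k := by rw [← hqk]; exact hne' q h
                rw [hGne k' hk'k, hval]
                calc Gl rest' k' ≤ scanB rest' := hih.2 k' (List.mem_map.mpr ⟨q, h, hqk⟩)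
                  _ ≤ _ := le_max_right _ _

theorem goB_some : ∀ (n : Nat) (ps : List (Int × Int)) (b : Int), ps.length ≤ n → ps ≠ [] →
    goB ps (some b) = some (max b (scanB ps)) := by
  intro n
  induction n with
  | zero =>
      intro ps b hlen hne
      cases ps
      · exact absurd rfl hne
      · simp at hlen
  | succ n ih =>
      rintro ⟨⟩ b hlen hne
      · exact absurd rfl hne
      rename_i kv rest
      obtain ⟨k, v⟩ := kv
      rw [goB, scanB]
      simp only [updBest]
      cases hr : rest.dropWhile (fun p => p.1 == k) with
      | nil =>
          simp only [goB]
          show (if v + ((rest.takeWhile (fun p => p.1 == k)).map (fun p => p.2)).sum > b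
              then some (v + ((rest.takeWhile (fun p => p.1 == k)).map (fun p => p.2)).sum) else some b)
              = some (max b (v + ((rest.takeWhile (fun p => p.1 == k)).map (fun p => p.2)).sum))
          split <;> rename_i hc <;> congr 1 <;> omega
      | cons x xs =>
          have hlen' : (x :: xs).length ≤ n := by
            have h1 := List.length_dropWhile_le (fun p => p.1 == k) rest
            rw [hr] at h1
            simp only [List.length_cons] at hlen
            omega
          have hupd : (if v + ((rest.takeWhile (fun p => p.1 == k)).map (fun p => p.2)).sum > b
              then some (v + ((rest.takeWhile (fun p => p.1 == k)).map (fun p => p.2)).sum) else some b)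
              = some (max b (v + ((rest.takeWhile (fun p => p.1 == k)).map (fun p => p.2)).sum)) := by
            split <;> rename_i hc <;> congr 1 <;> omega
          rw [hupd, ih _ _ hlen' (by simp)]
          rw [max_assoc]

theorem goB_none (ps : List (Int × Int)) (hne : ps ≠ []) :
    goB ps none = some (scanB ps) := by
  obtain ⟨⟨k, v⟩, rest, rfl⟩ : ∃ kv rest, ps = kv :: rest := by
    cases ps
    · exact absurd rfl hne
    · exact ⟨_, _, rfl⟩
  rw [goB, scanB]
  simp only [updBest]
  cases hr : rest.dropWhile (fun p => p.1 == k) with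
  | nil =>
      simp [goB]
  | cons x xs =>
      rw [goB_some (x :: xs).length _ _ le_rfl (by simp)]

theorem B_side (rates : List Int) (h : rates ≠ []) :
    IsMaxOf (get_max_rate_alt rates) rates (Fsum rates) := by
  set enum := PySem.List.enumerate rates with henum
  set pairs := enum.map (fun p => (p.2, p.2 + p.1)) with hpairs
  set ps := PySem.List.sorted pairs (fun p => p.1) with hps
  have hperm : ps.Perm pairs := PySem.List.sorted_perm pairs (fun p => p.1) false
  have hpw : ps.Pairwise (fun a b => a.1 ≤ b.1) := PySem.List.sorted_pairwise pairs (fun p => p.1)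
  have hpairsne : pairs ≠ [] := by
    rw [hpairs]
    simp only [ne_eq, List.map_eq_nil_iff]
    intro hen
    have := PySem.List.length_enumerate rates 0
    rw [← henum, hen] at this
    simp at this
    exact h (List.eq_nil_of_length_eq_zero this.symm)
  have hpsne : ps ≠ [] := by
    rw [hps, ne_eq, PySem.List.sorted_eq_nil_iff]
    exact hpairsne
  have hpfst : pairs.map (fun q => q.1) = rates := by
    rw [hpairs, List.map_map]
    exact PySem.List.map_snd_enumerate rates 0
  have hmem : ∀ k, k ∈ ps.map (fun q => q.1) ↔ k ∈ rates := by
    intro k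
    rw [← hpfst]
    exact (hperm.map (fun q => q.1)).mem_iff
  have hG : ∀ k, Gl ps k = Fsum rates k := by
    intro k
    unfold Gl
    have h1 : (ps.filter (fun q => q.1 == k)).Perm (pairs.filter (fun q => q.1 == k)) :=
      hperm.filter _
    rw [(h1.map (fun q => q.2)).sum_eq]
    rw [hpairs, List.filter_map, List.map_map]
    rfl
  have hval : get_max_rate_alt rates = scanB ps := by
    show (goB ps none).getD 0 = scanB ps
    rw [goB_none ps hpsne]
    rfl
  rw [hval]
  exact isMaxOf_congr (scanB_isMax ps.length ps le_rfl hpsne hpw) hmem hG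

-- ===== VERDICT (by name: the statement is the Claim_ definition above) =====
theorem get_max_rate_spec : Claim_equal_get_max_rate := by
  intro rates _ hpre
  exact isMaxOf_unique (A_side rates hpre) (B_side rates hpre)
    (fun _ => Iff.rfl) (fun _ => rfl)
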